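-- pv_equiv track=rewrite | github.com/chenzino/kalshi | bot/model.py | detect_scoring_run
-- ===== SOURCE A (Python) =====
-- def detect_scoring_run(score_log, window=5):
--     """Detect if a scoring run is happening.
--
--     Args:
--         score_log: List of (timestamp, team, points) recent scoring events
--         window: Number of recent events to consider
--     Returns:
--         (run_team, run_points, run_events) or None if no significant run
--     """
--     if len(score_log) < 3:
--         return None
--
--     recent = score_log[-window:]
--
--     # Count consecutive scores by one team
--     teams = [e[1] for e in recent]
--     points = [e[2] for e in recent]
--
--     # Check if one team dominates recent scoring
--     team_points = {}
--     for t, p in zip(teams, points):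
--         team_points[t] = team_points.get(t, 0) + p
--
--     if len(team_points) < 2:
--         # One team scored all recent points
--         dominant = list(team_points.keys())[0]
--         return (dominant, team_points[dominant], len(recent))
--
--     sorted_teams = sorted(team_points.items(), key=lambda x: x[1], reverse=True)
--     run_diff = sorted_teams[0][1] - sorted_teams[1][1]
--
--     if run_diff >= 8:
--         return (sorted_teams[0][0], run_diff, len(recent))
--
--     return None
-- ===== SOURCE B (Python) =====
-- def detect_scoring_run(score_log, window=5):
--     """Detect if a scoring run is happening (single-pass best/second scan, no sort)."""
--     if len(score_log) < 3:
--         return None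
--
--     recent = score_log[-window:]
--
--     team_points = {}
--     for _, t, p in recent:
--         team_points[t] = team_points.get(t, 0) + p
--
--     if len(team_points) < 2:
--         dominant = list(team_points.keys())[0]
--         return (dominant, team_points[dominant], len(recent))
--
--     best_team = best = second = None
--     for t, p in team_points.items():
--         if best is None or p > best:
--             best_team, second, best = t, best, p
--         elif second is None or p > second:
--             second = p
--
--     run_diff = best - second
--     if run_diff >= 8:
--         return (best_team, run_diff, len(recent))
--     return None
-- ===== Notes on version B (the rewrite author's own statement) =====
-- stated objective: alternative
-- what changed: The stable reverse sort of the team-points dict plus [0]/[1] indexing is replaced by a single pass over the dict items tracking the best team, best total and second-best total (strict > so ties keep the first-iterated team, matching the stable sort).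
-- outside the precondition, e.g. on detect_scoring_run([(1, 'a', 2), (2, 'a', 3), (3, 'b', 1)], -3): A raises IndexError, B raises IndexError
import Mathlib
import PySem

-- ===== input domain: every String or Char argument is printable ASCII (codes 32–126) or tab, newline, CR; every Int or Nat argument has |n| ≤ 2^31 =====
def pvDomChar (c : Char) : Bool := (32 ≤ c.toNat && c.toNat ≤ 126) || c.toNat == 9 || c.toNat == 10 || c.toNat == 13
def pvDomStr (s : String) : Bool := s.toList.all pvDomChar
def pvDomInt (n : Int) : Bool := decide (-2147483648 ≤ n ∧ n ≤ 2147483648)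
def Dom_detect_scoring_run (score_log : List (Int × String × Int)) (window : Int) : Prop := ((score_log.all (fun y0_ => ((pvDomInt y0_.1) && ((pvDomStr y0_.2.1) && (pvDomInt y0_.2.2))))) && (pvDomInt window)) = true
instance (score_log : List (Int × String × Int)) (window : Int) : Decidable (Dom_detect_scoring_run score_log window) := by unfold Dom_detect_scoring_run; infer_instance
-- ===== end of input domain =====

-- B replaces the stable reverse value-sort of the team-points dict by a single best/second-best
-- scan over its items (same result, no sort); everything else is unchanged (objective: alternative).

-- ===== PORT A =====
def detect_scoring_run (score_log : List (Int × String × Int)) (window : Int) : Option (String × Int × Int) :=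
  if PySem.List.len score_log < 3 then none
  else
    let recent := PySem.List.slice score_log (some (-window)) none
    let teams := recent.map (fun e => e.2.1)
    let points := recent.map (fun e => e.2.2)
    let team_points : PySem.Dict String Int :=
      (teams.zip points).foldl (fun d tp => d.insert tp.1 (d.getD tp.1 0 + tp.2)) PySem.Dict.empty
    if team_points.size < 2 then
      match (PySem.Dict.keys team_points)[0]? with
      | none => none          -- Python raises IndexError here (empty dict); excluded by Pre_
      | some dominant =>
        match team_points.get? dominant with
        | none => none        -- unreachable: dominant is a key
        | some v => some (dominant, v, PySem.List.len recent)
    else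
      match PySem.List.sorted team_points.items (fun x => x.2) true with
      | a :: b :: _ =>
        let run_diff := a.2 - b.2
        if run_diff ≥ 8 then some (a.1, run_diff, PySem.List.len recent) else none
      | _ => none             -- unreachable: the sorted items list has ≥ 2 entries

-- ===== PORT B =====
-- one step of B's loop: state is (best_team, best, second), all Optional as in Source B
def pvScanStep (st : Option String × Option Int × Option Int) (tp : String × Int) :
    Option String × Option Int × Option Int :=
  match st with
  | (bt, b?, s?) =>
    match b? with
    | none => (some tp.1, some tp.2, b?)        -- best is None: best_team, second, best = t, best, p
    | some b =>
      if tp.2 > b then (some tp.1, some tp.2, some b)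
      else
        match s? with
        | none => (bt, some b, some tp.2)       -- second is None: second = p
        | some s => if tp.2 > s then (bt, some b, some tp.2) else (bt, some b, some s)

def detect_scoring_run_alt (score_log : List (Int × String × Int)) (window : Int) : Option (String × Int × Int) :=
  if PySem.List.len score_log < 3 then none
  else
    let recent := PySem.List.slice score_log (some (-window)) none
    let team_points : PySem.Dict String Int :=
      recent.foldl (fun d e => d.insert e.2.1 (d.getD e.2.1 0 + e.2.2)) PySem.Dict.empty
    if team_points.size < 2 then
      match (PySem.Dict.keys team_points)[0]? with
      | none => none          -- Source B raises IndexError here too; excluded by Pre_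
      | some dominant =>
        match team_points.get? dominant with
        | none => none        -- unreachable: dominant is a key
        | some v => some (dominant, v, PySem.List.len recent)
    else
      match team_points.items.foldl pvScanStep (none, none, none) with
      | (some bt, some b, some s) =>
        let run_diff := b - s
        if run_diff ≥ 8 then some (bt, run_diff, PySem.List.len recent) else none
      | _ => none             -- unreachable: ≥ 2 items, so best and second are set

-- ===== PRECONDITION & SPEC =====
-- Pre_ excludes only the inputs where both Pythons raise IndexError: len(score_log) ≥ 3 but the
-- window slice score_log[-window:] is empty (window ≤ -len(score_log)), leaving an empty dict.
def Pre_detect_scoring_run (score_log : List (Int × String × Int)) (window : Int) : Prop :=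
  (score_log.length : Int) < 3 ∨ -window < (score_log.length : Int)
instance (score_log : List (Int × String × Int)) (window : Int) : Decidable (Pre_detect_scoring_run score_log window) := by unfold Pre_detect_scoring_run; infer_instance

def pvWitness_detect_scoring_run : (List (Int × String × Int)) × Int :=
  ([(0, "a", 5), (1, "a", 4), (2, "b", 0)], 5)

def Spec_detect_scoring_run (score_log : List (Int × String × Int)) (window : Int) (out : Option (String × Int × Int)) : Prop := out = detect_scoring_run_alt score_log window
instance (score_log : List (Int × String × Int)) (window : Int) (out : Option (String × Int × Int)) : Decidable (Spec_detect_scoring_run score_log window out) := by unfold Spec_detect_scoring_run; infer_instance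

-- ===== CLAIM (what is proved, stated in full; the proofs are below) =====
def Claim_equal_detect_scoring_run : Prop := ∀ (score_log : List (Int × String × Int)) (window : Int), Dom_detect_scoring_run score_log window → Pre_detect_scoring_run score_log window → Spec_detect_scoring_run score_log window (detect_scoring_run score_log window)

-- ===== LEMMAS AND PROOFS =====

-- project a descending-sorted list onto B's scan state: first key/value and second value
def pvProj : List (String × Int) → Option String × Option Int × Option Int
  | [] => (none, none, none)
  | [a] => (some a.1, some a.2, none)
  | a :: c :: _ => (some a.1, some a.2, some c.2)

theorem pvProj_insertBy (acc : List (String × Int)) (x : String × Int) :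
    pvProj (PySem.List.insertBy (fun a b => decide (b.2 < a.2)) x acc) =
      pvScanStep (pvProj acc) x := by
  match acc with
  | [] => rfl
  | [a] =>
    simp only [PySem.List.insertBy, pvProj, pvScanStep]
    by_cases h : a.2 < x.2 <;> simp [h]
  | a :: c :: rest =>
    simp only [PySem.List.insertBy, pvProj, pvScanStep]
    by_cases h1 : a.2 < x.2
    · simp [h1]
    · by_cases h2 : c.2 < x.2 <;> simp [h1, h2]

theorem pvProj_foldl (l : List (String × Int)) (acc : List (String × Int)) :
    pvProj (l.foldl (fun acc x => PySem.List.insertBy (fun a b => decide (b.2 < a.2)) x acc) acc) =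
      l.foldl pvScanStep (pvProj acc) := by
  induction l generalizing acc with
  | nil => rfl
  | cons x l ih => simp only [List.foldl_cons, ih, pvProj_insertBy]

theorem pvScan_eq_proj_sorted (l : List (String × Int)) :
    l.foldl pvScanStep (none, none, none) = pvProj (PySem.List.sorted l (fun x => x.2) true) := by
  rw [PySem.List.sorted_rev_eq_foldl_insertBy]
  exact (pvProj_foldl l []).symm

-- the only part where the two ports differ: sorted-head-two vs single-pass scan
theorem pvBranch_eq (tp : PySem.Dict String Int) (r : Int) :
    (match PySem.List.sorted tp.items (fun x => x.2) true with
      | a :: b :: _ =>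
        let run_diff := a.2 - b.2
        if run_diff ≥ 8 then some (a.1, run_diff, r) else none
      | _ => (none : Option (String × Int × Int))) =
    (match tp.items.foldl pvScanStep (none, none, none) with
      | (some bt, some b, some s) =>
        let run_diff := b - s
        if run_diff ≥ 8 then some (bt, run_diff, r) else none
      | _ => none) := by
  rw [pvScan_eq_proj_sorted]
  match h : PySem.List.sorted tp.items (fun x => x.2) true with
  | [] => rfl
  | [a] => rfl
  | a :: c :: rest => rfl

-- ===== VERDICT (by name: the statement is the Claim_ definition above) =====
theorem detect_scoring_run_spec : Claim_equal_detect_scoring_run := by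
  intro score_log window _ _
  unfold Spec_detect_scoring_run detect_scoring_run detect_scoring_run_alt
  simp only [List.zip_map', List.foldl_map]
  exact if_congr Iff.rfl rfl (if_congr Iff.rfl rfl (pvBranch_eq _ _))
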